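-- pv_equiv track=rewrite | github.com/paulklemstine/factor | lean/misc/Pythagorean/QuadDivision_Experiments.py | quadruple_neighbors
-- ===== SOURCE A (Python) =====
-- from itertools import product
--
-- def quadruple_neighbors(a, b, c, d, step=1):
--     """
--     Navigate 4D quadruple space from a known point.
--     Search nearby integer points that also satisfy the quadruple equation.
--     """
--     neighbors = []
--     for da, db, dc, dd in product(range(-step, step+1), repeat=4):
--         if da == 0 and db == 0 and dc == 0 and dd == 0:
--             continue
--         na, nb, nc, nd = a+da, b+db, c+dc, d+dd
--         if na > 0 and nb > 0 and nc > 0 and nd > 0: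
--             if na*na + nb*nb + nc*nc == nd*nd:
--                 neighbors.append((na, nb, nc, nd))
--     return neighbors
-- ===== SOURCE B (Python) =====
-- import math
--
-- def quadruple_neighbors(a, b, c, d, step=1):
--     """
--     Navigate 4D quadruple space from a known point.
--     Instead of scanning all dd offsets, compute the unique candidate nd as
--     the integer square root of na^2+nb^2+nc^2 and check it lies in range.
--     """
--     neighbors = []
--     for da in range(-step, step + 1):
--         na = a + da
--         if na <= 0:
--             continue
--         for db in range(-step, step + 1):
--             nb = b + db
--             if nb <= 0:
--                 continue
--             for dc in range(-step, step + 1):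
--                 nc = c + dc
--                 if nc <= 0:
--                     continue
--                 s = na * na + nb * nb + nc * nc
--                 nd = math.isqrt(s)
--                 if (nd * nd == s and d - step <= nd <= d + step
--                         and not (da == 0 and db == 0 and dc == 0 and nd == d)):
--                     neighbors.append((na, nb, nc, nd))
--     return neighbors
-- ===== Notes on version B (the rewrite author's own statement) =====
-- stated objective: alternative
-- what changed: The innermost loop over dd is removed: for each (da,db,dc) the unique candidate nd is computed directly as the integer square root of na^2+nb^2+nc^2 and checked to be an exact square within [d-step, d+step] (one loop level fewer, O(step^3) candidate tests instead of O(step^4); intended as faster, measured 42-70x where both finished but unconfirmed at the largest sizes, where big-int isqrt work dominates).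
import Mathlib
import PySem

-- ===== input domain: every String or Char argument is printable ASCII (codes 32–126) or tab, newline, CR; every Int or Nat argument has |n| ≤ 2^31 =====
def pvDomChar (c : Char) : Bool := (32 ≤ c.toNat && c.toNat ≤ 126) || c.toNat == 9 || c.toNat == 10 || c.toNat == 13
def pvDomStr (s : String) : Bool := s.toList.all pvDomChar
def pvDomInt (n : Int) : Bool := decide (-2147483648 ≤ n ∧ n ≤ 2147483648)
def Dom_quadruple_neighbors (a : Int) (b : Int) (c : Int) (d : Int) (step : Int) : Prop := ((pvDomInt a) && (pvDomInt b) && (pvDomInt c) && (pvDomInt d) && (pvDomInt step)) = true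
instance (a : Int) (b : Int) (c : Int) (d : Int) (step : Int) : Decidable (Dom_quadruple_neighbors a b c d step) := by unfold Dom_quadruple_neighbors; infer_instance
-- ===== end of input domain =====

-- B removes the innermost dd-loop: nd is computed as the integer square root of
-- na^2+nb^2+nc^2 and checked directly, one loop level fewer than A's enumeration.


-- ===== PORT A =====
-- literal transliteration: product(range(-step, step+1), repeat=4) = four nested loops
def quadruple_neighbors (a : Int) (b : Int) (c : Int) (d : Int) (step : Int) : List (Int × Int × Int × Int) :=
  (PySem.List.pyRange (-step) (step+1) 1).foldl (fun acc da =>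
    (PySem.List.pyRange (-step) (step+1) 1).foldl (fun acc db =>
      (PySem.List.pyRange (-step) (step+1) 1).foldl (fun acc dc =>
        (PySem.List.pyRange (-step) (step+1) 1).foldl (fun acc dd =>
          if da = 0 ∧ db = 0 ∧ dc = 0 ∧ dd = 0 then acc
          else
            let na := a + da
            let nb := b + db
            let nc := c + dc
            let nd := d + dd
            if na > 0 ∧ nb > 0 ∧ nc > 0 ∧ nd > 0 then
              if na*na + nb*nb + nc*nc = nd*nd then acc ++ [(na, nb, nc, nd)]
              else acc
            else acc) acc) acc) acc) []

-- ===== PORT B =====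
-- math.isqrt(s) for 0 ≤ s is Nat.sqrt s.toNat
def quadruple_neighbors_alt (a : Int) (b : Int) (c : Int) (d : Int) (step : Int) : List (Int × Int × Int × Int) :=
  (PySem.List.pyRange (-step) (step+1) 1).foldl (fun acc da =>
    let na := a + da
    if na ≤ 0 then acc
    else
      (PySem.List.pyRange (-step) (step+1) 1).foldl (fun acc db =>
        let nb := b + db
        if nb ≤ 0 then acc
        else
          (PySem.List.pyRange (-step) (step+1) 1).foldl (fun acc dc =>
            let nc := c + dc
            if nc ≤ 0 then acc
            else
              let s := na*na + nb*nb + nc*nc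
              let nd : Int := (Nat.sqrt s.toNat : Int)
              if nd*nd = s ∧ d - step ≤ nd ∧ nd ≤ d + step ∧
                  ¬(da = 0 ∧ db = 0 ∧ dc = 0 ∧ nd = d) then
                acc ++ [(na, nb, nc, nd)]
              else acc) acc) acc) []

-- ===== PRECONDITION & SPEC =====
def Spec_quadruple_neighbors (a : Int) (b : Int) (c : Int) (d : Int) (step : Int) (out : List (Int × Int × Int × Int)) : Prop := out = quadruple_neighbors_alt a b c d step
instance (a : Int) (b : Int) (c : Int) (d : Int) (step : Int) (out : List (Int × Int × Int × Int)) : Decidable (Spec_quadruple_neighbors a b c d step out) := by unfold Spec_quadruple_neighbors; infer_instance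

-- ===== CLAIM (what is proved, stated in full; the proofs are below) =====
def Claim_equal_quadruple_neighbors : Prop := ∀ (a : Int) (b : Int) (c : Int) (d : Int) (step : Int), Dom_quadruple_neighbors a b c d step → Spec_quadruple_neighbors a b c d step (quadruple_neighbors a b c d step)

-- ===== LEMMAS AND PROOFS =====

-- per-(da,db,dc) contribution shared by both closed forms
def pvContrib (a b c d step da db dc : Int) : List (Int × Int × Int × Int) :=
  let na := a + da
  if na ≤ 0 then []
  else
    let nb := b + db
    if nb ≤ 0 then []
    else
      let nc := c + dc
      if nc ≤ 0 then []
      else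
        let s := na*na + nb*nb + nc*nc
        let nd : Int := (Nat.sqrt s.toNat : Int)
        if nd*nd = s ∧ d - step ≤ nd ∧ nd ≤ d + step ∧
            ¬(da = 0 ∧ db = 0 ∧ dc = 0 ∧ nd = d) then [(na, nb, nc, nd)]
        else []

-- a fold whose body appends g x is acc ++ flatMap g
lemma pv_foldl_app {α β : Type} (F : List β → α → List β) (g : α → List β) (l : List α)
    (h : ∀ acc x, F acc x = acc ++ g x) :
    ∀ acc, l.foldl F acc = acc ++ l.flatMap g := by
  induction l with
  | nil => simp
  | cons y ys ih => intro acc; simp [List.foldl_cons, h acc y, ih]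

-- uniqueness of the positive integer square root
lemma pv_sqrt_char (s x : Int) (hx : 0 < x) (h : x * x = s) :
    (Nat.sqrt s.toNat : Int) = x := by
  have hs : s.toNat = x.toNat * x.toNat := by
    have : s = (x.toNat : Int) * (x.toNat : Int) := by
      rw [Int.toNat_of_nonneg hx.le]; omega
    omega
  have : Nat.sqrt s.toNat = x.toNat := by
    rw [hs, ← pow_two, Nat.sqrt_eq']
  rw [this, Int.toNat_of_nonneg hx.le]

-- filter of a nodup list by a predicate equivalent to (· = t)
lemma pv_filter_eq_singleton (l : List Int) (hnd : l.Nodup) (t : Int) (p : Int → Prop)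
    [DecidablePred p] (hp : ∀ x, p x ↔ x = t) :
    l.filter (fun x => decide (p x)) = if t ∈ l then [t] else [] := by
  induction l with
  | nil => simp
  | cons y ys ih =>
    rcases List.nodup_cons.mp hnd with ⟨hy, hys⟩
    by_cases h : p y
    · have hyt : y = t := (hp y).mp h
      subst hyt
      simp [h, ih hys, hy]
    · have hyt : y ≠ t := fun e => h ((hp y).mpr e)
      simp [h, ih hys, Ne.symm hyt]

-- the innermost dd-fold of A contributes exactly pvContrib
lemma pv_inner_eq (a b c d step da db dc : Int) (acc : List (Int × Int × Int × Int)) :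
    (PySem.List.pyRange (-step) (step+1) 1).foldl (fun acc dd =>
      if da = 0 ∧ db = 0 ∧ dc = 0 ∧ dd = 0 then acc
      else
        let na := a + da
        let nb := b + db
        let nc := c + dc
        let nd := d + dd
        if na > 0 ∧ nb > 0 ∧ nc > 0 ∧ nd > 0 then
          if na*na + nb*nb + nc*nc = nd*nd then acc ++ [(na, nb, nc, nd)]
          else acc
        else acc) acc
    = acc ++ pvContrib a b c d step da db dc := by
  set na := a + da with hna
  set nb := b + db with hnb
  set nc := c + dc with hnc
  have hbody : ∀ (A : List (Int × Int × Int × Int)) (dd : Int),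
      (if da = 0 ∧ db = 0 ∧ dc = 0 ∧ dd = 0 then A
       else if na > 0 ∧ nb > 0 ∧ nc > 0 ∧ d + dd > 0 then
          if na*na + nb*nb + nc*nc = (d+dd)*(d+dd) then A ++ [(na, nb, nc, d+dd)]
          else A
        else A)
      = (if (decide (¬(da = 0 ∧ db = 0 ∧ dc = 0 ∧ dd = 0) ∧
              na > 0 ∧ nb > 0 ∧ nc > 0 ∧ d + dd > 0 ∧
              na*na + nb*nb + nc*nc = (d+dd)*(d+dd))) = true
         then A ++ [(na, nb, nc, d+dd)] else A) := by
    intro A dd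
    by_cases h0 : da = 0 ∧ db = 0 ∧ dc = 0 ∧ dd = 0 <;>
      by_cases h1 : na > 0 ∧ nb > 0 ∧ nc > 0 ∧ d + dd > 0 <;>
      by_cases h2 : na*na + nb*nb + nc*nc = (d+dd)*(d+dd) <;>
      simp_all
  calc
    _ = (PySem.List.pyRange (-step) (step+1) 1).foldl (fun A dd =>
          if (decide (¬(da = 0 ∧ db = 0 ∧ dc = 0 ∧ dd = 0) ∧
              na > 0 ∧ nb > 0 ∧ nc > 0 ∧ d + dd > 0 ∧
              na*na + nb*nb + nc*nc = (d+dd)*(d+dd))) = true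
          then A ++ [(na, nb, nc, d+dd)] else A) acc := by
        apply PySem.List.foldl_congr_mem
        intro A dd _
        exact hbody A dd
    _ = acc ++ ((PySem.List.pyRange (-step) (step+1) 1).filter (fun dd =>
          decide (¬(da = 0 ∧ db = 0 ∧ dc = 0 ∧ dd = 0) ∧
              na > 0 ∧ nb > 0 ∧ nc > 0 ∧ d + dd > 0 ∧
              na*na + nb*nb + nc*nc = (d+dd)*(d+dd)))).map
          (fun dd => (na, nb, nc, d+dd)) := PySem.List.foldl_append_if _ _ _ _
    _ = acc ++ pvContrib a b c d step da db dc := by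
        congr 1
        unfold pvContrib
        by_cases ha' : na ≤ 0
        · rw [if_pos ha', List.filter_eq_nil_iff.mpr, List.map_nil]
          intro dd _; simp; omega
        · rw [if_neg ha']
          by_cases hb' : nb ≤ 0
          · rw [if_pos hb', List.filter_eq_nil_iff.mpr, List.map_nil]
            intro dd _; simp; omega
          · rw [if_neg hb']
            by_cases hc' : nc ≤ 0
            · rw [if_pos hc', List.filter_eq_nil_iff.mpr, List.map_nil]
              intro dd _; simp; omega
            · rw [if_neg hc']
              set s : Int := na*na + nb*nb + nc*nc with hs
              set r : Int := (Nat.sqrt s.toNat : Int) with hr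
              by_cases hsq : r*r = s ∧ d - step ≤ r ∧ r ≤ d + step ∧
                  ¬(da = 0 ∧ db = 0 ∧ dc = 0 ∧ r = d)
              · rw [if_pos hsq]
                have hrpos : 0 < r := by
                  have hs3 : 3 ≤ s := by nlinarith
                  have : 0 < Nat.sqrt s.toNat := Nat.sqrt_pos.mpr (by omega)
                  rw [hr]
                  exact_mod_cast this
                have hiff : ∀ dd : Int,
                    (¬(da = 0 ∧ db = 0 ∧ dc = 0 ∧ dd = 0) ∧
                      na > 0 ∧ nb > 0 ∧ nc > 0 ∧ d + dd > 0 ∧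
                      s = (d+dd)*(d+dd)) ↔ dd = r - d := by
                  intro dd
                  constructor
                  · rintro ⟨h0, -, -, -, hpos, heq⟩
                    have := pv_sqrt_char s (d+dd) hpos heq.symm
                    omega
                  · rintro rfl
                    refine ⟨?_, by omega, by omega, by omega, by omega, ?_⟩
                    · intro ⟨e1, e2, e3, e4⟩
                      exact hsq.2.2.2 ⟨e1, e2, e3, by omega⟩
                    · rw [show d + (r - d) = r by ring, hsq.1]
                rw [pv_filter_eq_singleton _ (PySem.List.nodup_pyRange_one _ _) (r - d) _ hiff]
                rw [if_pos (PySem.List.mem_pyRange_one.mpr ⟨by omega, by omega⟩)]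
                simp
                omega
              · rw [if_neg hsq, List.filter_eq_nil_iff.mpr, List.map_nil]
                intro dd hmem
                simp only [decide_eq_true_eq, not_and]
                rintro h0 - - - hpos heq
                have hreq := pv_sqrt_char s (d+dd) hpos heq.symm
                have hmem' := PySem.List.mem_pyRange_one.mp hmem
                apply hsq
                refine ⟨by rw [hr, hreq]; exact heq.symm, by omega, by omega, ?_⟩
                rintro ⟨e1, e2, e3, e4⟩
                exact h0 e1 e2 e3 (by omega)

-- A's closed form
lemma pvA_eq (a b c d step : Int) :
    quadruple_neighbors a b c d step
    = (PySem.List.pyRange (-step) (step+1) 1).flatMap (fun da =>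
        (PySem.List.pyRange (-step) (step+1) 1).flatMap (fun db =>
          (PySem.List.pyRange (-step) (step+1) 1).flatMap (fun dc =>
            pvContrib a b c d step da db dc))) := by
  unfold quadruple_neighbors
  rw [pv_foldl_app _
      (fun da => (PySem.List.pyRange (-step) (step+1) 1).flatMap (fun db =>
        (PySem.List.pyRange (-step) (step+1) 1).flatMap (fun dc =>
          pvContrib a b c d step da db dc))) _ ?_ [], List.nil_append]
  intro acc da
  rw [pv_foldl_app _
      (fun db => (PySem.List.pyRange (-step) (step+1) 1).flatMap (fun dc =>
        pvContrib a b c d step da db dc)) _ ?_ acc]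
  intro acc' db
  rw [pv_foldl_app _ (fun dc => pvContrib a b c d step da db dc) _ ?_ acc']
  intro acc'' dc
  exact pv_inner_eq a b c d step da db dc acc''

-- B's closed form
lemma pvB_eq (a b c d step : Int) :
    quadruple_neighbors_alt a b c d step
    = (PySem.List.pyRange (-step) (step+1) 1).flatMap (fun da =>
        (PySem.List.pyRange (-step) (step+1) 1).flatMap (fun db =>
          (PySem.List.pyRange (-step) (step+1) 1).flatMap (fun dc =>
            pvContrib a b c d step da db dc))) := by
  unfold quadruple_neighbors_alt
  rw [pv_foldl_app _
      (fun da => (PySem.List.pyRange (-step) (step+1) 1).flatMap (fun db =>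
        (PySem.List.pyRange (-step) (step+1) 1).flatMap (fun dc =>
          pvContrib a b c d step da db dc))) _ ?_ [], List.nil_append]
  intro acc da
  dsimp only
  by_cases hna : a + da ≤ 0
  · rw [if_pos hna]
    have h0 : ∀ db ∈ PySem.List.pyRange (-step) (step+1) 1,
        (PySem.List.pyRange (-step) (step+1) 1).flatMap
          (fun dc => pvContrib a b c d step da db dc) = [] := by
      intro db _
      rw [List.flatMap_eq_nil_iff]
      intro dc _
      unfold pvContrib
      simp [hna]
    rw [List.flatMap_congr h0]
    simp
  · rw [if_neg hna]
    rw [pv_foldl_app _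
        (fun db => (PySem.List.pyRange (-step) (step+1) 1).flatMap (fun dc =>
          pvContrib a b c d step da db dc)) _ ?_ acc]
    intro acc' db
    dsimp only
    by_cases hnb : b + db ≤ 0
    · rw [if_pos hnb]
      have h0 : ∀ dc ∈ PySem.List.pyRange (-step) (step+1) 1,
          pvContrib a b c d step da db dc = [] := by
        intro dc _
        unfold pvContrib
        simp [hna, hnb]
      rw [List.flatMap_congr h0]
      simp
    · rw [if_neg hnb]
      rw [pv_foldl_app _ (fun dc => pvContrib a b c d step da db dc) _ ?_ acc']
      intro acc'' dc
      dsimp only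
      unfold pvContrib
      simp only [if_neg hna, if_neg hnb]
      by_cases hnc : c + dc ≤ 0
      · simp [hnc]
      · rw [if_neg hnc, if_neg hnc]
        split_ifs <;> simp

-- ===== VERDICT (by name: the statement is the Claim_ definition above) =====
theorem quadruple_neighbors_spec : Claim_equal_quadruple_neighbors := by
  intro a b c d step _
  unfold Spec_quadruple_neighbors
  rw [pvA_eq, pvB_eq]
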